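-- pv_equiv track=rewrite | github.com/av-research/fusion-training | scripts/count_pixels.py | _iseauto_weather
-- ===== SOURCE A (Python) =====
-- def _iseauto_weather(path: str) -> str:
--     """Extract weather label from ISEAuto path: labeled/{day_fair|day_rain|night_fair|night_rain}/..."""
--     parts = path.replace("\\", "/").split("/")
--     mapping = {
--         "day_fair":   "Day Fair",
--         "day_rain":   "Day Rain",
--         "night_fair": "Night Fair",
--         "night_rain": "Night Rain",
--     }
--     for part in parts:
--         if part in mapping:
--             return mapping[part]
--     return "Unknown"
-- ===== SOURCE B (Python) =====
-- def _iseauto_weather(path: str) -> str: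
--     """Extract weather label from ISEAuto path: derive it from the part's tokens instead of a lookup table."""
--     for part in path.replace("\\", "/").split("/"):
--         i = part.find("_")
--         if i != -1 and part[:i] in ("day", "night") and part[i + 1:] in ("fair", "rain"):
--             return " ".join(t.capitalize() for t in (part[:i], part[i + 1:]))
--     return "Unknown"
-- ===== Notes on version B (the rewrite author's own statement) =====
-- stated objective: simpler
-- what changed: B drops A's four-entry lookup table and instead derives the label structurally: it locates the underscore in each path part, tests the two tokens against {day,night} and {fair,rain}, and builds the result by capitalising and joining the tokens.
import Mathlib
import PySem

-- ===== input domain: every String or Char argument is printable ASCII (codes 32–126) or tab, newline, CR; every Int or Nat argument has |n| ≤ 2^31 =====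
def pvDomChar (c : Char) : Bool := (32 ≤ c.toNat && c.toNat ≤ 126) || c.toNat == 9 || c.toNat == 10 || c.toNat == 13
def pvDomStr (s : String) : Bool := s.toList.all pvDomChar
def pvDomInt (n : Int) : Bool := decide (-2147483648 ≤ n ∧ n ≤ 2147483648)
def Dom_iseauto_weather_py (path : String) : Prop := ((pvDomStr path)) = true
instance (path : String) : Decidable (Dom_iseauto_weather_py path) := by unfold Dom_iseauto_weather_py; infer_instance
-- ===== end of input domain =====

-- B drops A's lookup table and derives the label from the part's '_'-separated tokens
-- (membership tests + capitalisation); objective: simpler. Return values proved equal on all inputs.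

-- ===== PORT A =====
-- the dict literal of A
def pvMappingA : PySem.Dict String String :=
  PySem.Dict.ofList
    [("day_fair", "Day Fair"), ("day_rain", "Day Rain"),
     ("night_fair", "Night Fair"), ("night_rain", "Night Rain")]

-- 'for part in parts: if part in mapping: return mapping[part]' / 'return "Unknown"'
def pvGoA : List String → String
  | [] => "Unknown"
  | p :: rest => if pvMappingA.contains p then pvMappingA.getD p "Unknown" else pvGoA rest

def iseauto_weather_py (path : String) : String :=
  -- sep "/" is a nonempty literal, so split? always returns some: getD [] is exact
  let parts := (PySem.Str.split? (PySem.Str.replace path "\\" "/") "/").getD []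
  pvGoA parts

-- ===== PORT B =====
-- t.capitalize(): first char uppercased, rest lowered — exact on the ASCII domain
def pvCapPy (s : String) : String :=
  match s.toList with
  | [] => ""
  | c :: t => String.ofList (PySem.Chars.upperChar c :: PySem.Chars.lower t)

-- 'i != -1 and part[:i] in ("day","night") and part[i+1:] in ("fair","rain")'
def pvOkB (part : String) : Bool :=
  let i := PySem.Str.find part "_"
  i != -1 &&
    (PySem.Str.slice part none (some i) == "day" || PySem.Str.slice part none (some i) == "night") &&
    (PySem.Str.slice part (some (i + 1)) none == "fair" || PySem.Str.slice part (some (i + 1)) none == "rain")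

def pvGoB : List String → String
  | [] => "Unknown"
  | p :: rest =>
    if pvOkB p then
      let i := PySem.Str.find p "_"
      PySem.Str.join " " [pvCapPy (PySem.Str.slice p none (some i)), pvCapPy (PySem.Str.slice p (some (i + 1)) none)]
    else pvGoB rest

def iseauto_weather_py_alt (path : String) : String :=
  pvGoB ((PySem.Str.split? (PySem.Str.replace path "\\" "/") "/").getD [])

-- ===== PRECONDITION & SPEC =====
def Spec_iseauto_weather_py (path : String) (out : String) : Prop := out = iseauto_weather_py_alt path
instance (path : String) (out : String) : Decidable (Spec_iseauto_weather_py path out) := by unfold Spec_iseauto_weather_py; infer_instance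

-- ===== CLAIM (what is proved, stated in full; the proofs are below) =====
def Claim_equal_iseauto_weather_py : Prop := ∀ (path : String), Dom_iseauto_weather_py path → Spec_iseauto_weather_py path (iseauto_weather_py path)

-- ===== LEMMAS AND PROOFS =====

-- reconstruction: if '_' sits at position n, the string is (take n) ++ '_' :: (drop (n+1))
theorem pvRecon (cs : List Char) (n : Nat) (hpre : ['_'] <+: cs.drop n) :
    cs = cs.take n ++ '_' :: cs.drop (n + 1) := by
  obtain ⟨s, hs⟩ := hpre
  have hdn : cs.drop n = '_' :: s := by simpa using hs.symm
  have hd1 : cs.drop (n + 1) = s := by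
    have h := List.drop_drop (l := cs) (i := 1) (j := n)
    rw [hdn] at h
    simp at h
    exact h.symm
  conv_lhs => rw [← List.take_append_drop n cs]
  rw [hdn, hd1]

-- if B's guard accepts a part, that part IS one of A's four keys
theorem pvOkB_keys (p : String) (h : pvOkB p = true) :
    p = "day_fair" ∨ p = "day_rain" ∨ p = "night_fair" ∨ p = "night_rain" := by
  unfold pvOkB at h
  simp only [Bool.and_eq_true, bne_iff_ne, ne_eq, Bool.or_eq_true, beq_iff_eq] at h
  obtain ⟨⟨hne, hh⟩, ht⟩ := h
  have hfind : PySem.Str.find p "_" = PySem.Chars.find p.toList ['_'] := by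
    simp [PySem.Str.find]
  rw [hfind] at hne hh ht
  have hge := PySem.Chars.neg_one_le_find p.toList ['_']
  have h0 : 0 ≤ PySem.Chars.find p.toList ['_'] := by omega
  have hspec := (PySem.Chars.find_spec h0).1
  have hrecon := pvRecon p.toList (PySem.Chars.find p.toList ['_']).toNat hspec
  -- the slices are take/drop
  have hhead : (PySem.Str.slice p none (some (PySem.Chars.find p.toList ['_']))).toList
      = p.toList.take (PySem.Chars.find p.toList ['_']).toNat := by
    rw [PySem.Str.toList_slice, PySem.Chars.slice_eq_listSlice, PySem.List.slice_to _ h0]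
  have htail : (PySem.Str.slice p (some (PySem.Chars.find p.toList ['_'] + 1)) none).toList
      = p.toList.drop ((PySem.Chars.find p.toList ['_']).toNat + 1) := by
    rw [PySem.Str.toList_slice, PySem.Chars.slice_eq_listSlice, PySem.List.slice_from _ (by omega)]
    congr 1
    omega
  have key : ∀ (hs ts : String), p.toList.take (PySem.Chars.find p.toList ['_']).toNat = hs.toList → p.toList.drop ((PySem.Chars.find p.toList ['_']).toNat + 1) = ts.toList →
      p.toList = hs.toList ++ '_' :: ts.toList := by
    intro hs ts e1 e2
    rw [hrecon, e1, e2]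
  rcases hh with hh | hh <;> rcases ht with ht | ht
  · left
    apply String.toList_inj.mp
    have := key "day" "fair" (by rw [← hhead, hh]) (by rw [← htail, ht])
    simpa using this
  · right; left
    apply String.toList_inj.mp
    have := key "day" "rain" (by rw [← hhead, hh]) (by rw [← htail, ht])
    simpa using this
  · right; right; left
    apply String.toList_inj.mp
    have := key "night" "fair" (by rw [← hhead, hh]) (by rw [← htail, ht])
    simpa using this
  · right; right; right
    apply String.toList_inj.mp
    have := key "night" "rain" (by rw [← hhead, hh]) (by rw [← htail, ht])
    simpa using this

theorem pvGo_eq (parts : List String) : pvGoA parts = pvGoB parts := by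
  induction parts with
  | nil => rfl
  | cons p rest ih =>
    by_cases hk : p = "day_fair" ∨ p = "day_rain" ∨ p = "night_fair" ∨ p = "night_rain"
    · rcases hk with h | h | h | h <;> subst h <;> rfl
    · simp only [not_or] at hk
      obtain ⟨h1, h2, h3, h4⟩ := hk
      have hA : pvMappingA.contains p = false := by
        have hkeys : pvMappingA.keys = ["day_fair", "day_rain", "night_fair", "night_rain"] := by decide
        simp [pysem, hkeys]
        exact ⟨h1, h2, h3, h4⟩
      have hB : pvOkB p = false := by
        rcases Bool.eq_false_or_eq_true (pvOkB p) with hb | hb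
        · rcases pvOkB_keys p hb with h | h | h | h <;> simp_all
        · exact hb
      rw [pvGoA, pvGoB, hA, hB]
      simpa using ih

-- ===== VERDICT (by name: the statement is the Claim_ definition above) =====
theorem iseauto_weather_py_spec : Claim_equal_iseauto_weather_py := by
  intro path _
  unfold Spec_iseauto_weather_py iseauto_weather_py iseauto_weather_py_alt
  exact pvGo_eq _
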